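-- pv_equiv track=rewrite | github.com/sco1/adventofcode | 2015/Day_08/aoc_2015_day8.py | size_if_escaped
-- ===== SOURCE A (Python) =====
-- def size_if_escaped(in_str: str) -> int:
--     """
--     Calculate the length of the fully escaped version of the input string.
--
--     e.g. "aaa\\"aaa" becomes "\\"aaa\\\\\\"aaa\\"", which has a length of 16
--
--     Note: The above example contains additonal escapes so they render properly after interpretation
--     """
--     # Let's do it by walking since I can't get string replacement to cooperate
--     escaped_str = ['"']
--     for char in in_str:
--         if char == "\\":
--             escaped_str.append("\\\\")
--         elif char == '"':
--             escaped_str.append('\\"')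
--         else:
--             escaped_str.append(char)
--     else:
--         escaped_str.append('"')
--
--     return len("".join(escaped_str))
-- ===== SOURCE B (Python) =====
-- def size_if_escaped(in_str: str) -> int:
--     # Closed form: two surrounding quotes, plus one extra char per backslash/quote escaped.
--     return len(in_str) + 2 + in_str.count("\\") + in_str.count('"')
-- ===== Notes on version B (the rewrite author's own statement) =====
-- stated objective: simpler
-- what changed: B replaces the per-character loop that builds the escaped string and measures it with a closed-form arithmetic count: len(in_str) + 2 + count of backslashes + count of quotes.
import Mathlib
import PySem

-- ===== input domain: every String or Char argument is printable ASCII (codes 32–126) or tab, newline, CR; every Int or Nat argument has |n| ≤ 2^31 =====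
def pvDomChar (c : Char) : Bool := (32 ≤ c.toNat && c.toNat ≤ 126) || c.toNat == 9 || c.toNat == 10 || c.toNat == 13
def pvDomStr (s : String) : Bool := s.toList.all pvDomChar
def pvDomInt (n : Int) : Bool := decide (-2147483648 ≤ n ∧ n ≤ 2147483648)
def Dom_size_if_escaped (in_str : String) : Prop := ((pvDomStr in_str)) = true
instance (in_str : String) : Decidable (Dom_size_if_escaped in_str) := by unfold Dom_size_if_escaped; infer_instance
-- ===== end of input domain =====

-- B computes the escaped length as a closed-form count instead of building the escaped string (simpler).


-- ===== PORT A =====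
-- escaped_str is the list of string pieces; "".join then len = length of the intercalated char list
def size_if_escaped (in_str : String) : Int :=
  let escaped_str : List (List Char) :=
    in_str.toList.foldl (fun acc c =>
      if c = '\\' then acc ++ [['\\', '\\']]
      else if c = '"' then acc ++ [['\\', '"']]
      else acc ++ [[c]]) [['"']]
  let escaped_str := escaped_str ++ [['"']]
  ((PySem.Chars.join [] escaped_str).length : Int)

-- ===== PORT B =====
def size_if_escaped_alt (in_str : String) : Int :=
  (PySem.Str.len in_str) + 2 + (PySem.Str.count in_str "\\" : Int) + (PySem.Str.count in_str "\"" : Int)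

-- ===== PRECONDITION & SPEC =====
def Spec_size_if_escaped (in_str : String) (out : Int) : Prop := out = size_if_escaped_alt in_str
instance (in_str : String) (out : Int) : Decidable (Spec_size_if_escaped in_str out) := by unfold Spec_size_if_escaped; infer_instance

-- ===== CLAIM (what is proved, stated in full; the proofs are below) =====
def Claim_equal_size_if_escaped : Prop := ∀ (in_str : String), Dom_size_if_escaped in_str → Spec_size_if_escaped in_str (size_if_escaped in_str)

-- ===== LEMMAS AND PROOFS =====

-- the piece appended by A's loop for one character
def pvEscPiece (c : Char) : List Char :=
  if c = '\\' then ['\\', '\\'] else if c = '"' then ['\\', '"'] else [c]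

theorem pvFoldA_eq (cs : List Char) (acc : List (List Char)) :
    cs.foldl (fun acc c =>
      if c = '\\' then acc ++ [['\\', '\\']]
      else if c = '"' then acc ++ [['\\', '"']]
      else acc ++ [[c]]) acc = acc ++ cs.map pvEscPiece := by
  have h : (fun (acc : List (List Char)) (c : Char) =>
      if c = '\\' then acc ++ [['\\', '\\']]
      else if c = '"' then acc ++ [['\\', '"']]
      else acc ++ [[c]]) = fun acc c => acc ++ [pvEscPiece c] := by
    funext a c; unfold pvEscPiece; split_ifs <;> rfl
  rw [h, PySem.List.foldl_append_singleton_eq_map]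

theorem pvSumPieces (cs : List Char) :
    ((cs.map pvEscPiece).map List.length).sum
      = cs.length + cs.count '\\' + cs.count '"' := by
  induction cs with
  | nil => simp
  | cons c t ih =>
    simp only [List.map_cons, List.sum_cons, List.length_cons, List.count_cons, ih]
    unfold pvEscPiece
    split_ifs <;> simp_all <;> omega

-- Python's str.count with a single-char needle is List.count
theorem pvGoSingle (v : Char) : ∀ (cs : List Char) (acc : Nat),
    PySem.Chars.count.go [v] cs.length cs acc = acc + cs.count v
  | [], acc => by simp [PySem.Chars.count.go]
  | c :: t, acc => by
    show PySem.Chars.count.go [v] (t.length + 1) (c :: t) acc = _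
    rw [show (t.length + 1) = (t.length).succ from rfl]
    by_cases h : c = v
    · rw [show PySem.Chars.count.go [v] t.length.succ (c :: t) acc
          = PySem.Chars.count.go [v] t.length (List.drop 1 (c :: t)) (acc + 1) by
        conv_lhs => rw [PySem.Chars.count.go]
        simp [h, List.isPrefixOf]]
      simp [pvGoSingle v t (acc + 1), h]
      omega
    · rw [show PySem.Chars.count.go [v] t.length.succ (c :: t) acc
          = PySem.Chars.count.go [v] t.length t acc by
        conv_lhs => rw [PySem.Chars.count.go]
        simp [List.isPrefixOf, show (v == c) = false by simp [Ne.symm h]]]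
      simp [pvGoSingle v t acc, h]

theorem pvCountSingle (cs : List Char) (v : Char) :
    PySem.Chars.count cs [v] = cs.count v := by
  simp [PySem.Chars.count, pvGoSingle]


theorem pvIntercalateNil : ∀ (l : List (List Char)), List.intercalate [] l = l.flatten
  | [] => rfl
  | [x] => by simp [List.intercalate]
  | x :: y :: t => by
    have ih := pvIntercalateNil (y :: t)
    simp only [List.intercalate, List.intersperse] at ih ⊢
    simp_all

-- ===== VERDICT (by name: the statement is the Claim_ definition above) =====
theorem size_if_escaped_spec : Claim_equal_size_if_escaped := by
  intro s _
  unfold Spec_size_if_escaped size_if_escaped size_if_escaped_alt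
  rw [pvFoldA_eq]
  simp only [PySem.Chars.join, pvIntercalateNil, PySem.Str.count_eq, PySem.Str.len]
  rw [show ("\\" : String).toList = ['\\'] from rfl, show ("\"" : String).toList = ['"'] from rfl,
      pvCountSingle, pvCountSingle]
  simp only [List.flatten_append, List.flatten_cons, List.length_append, List.length_flatten,
    List.flatten_nil]
  rw [pvSumPieces s.toList]
  push_cast [List.length_cons, List.length_nil]
  ring
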